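-- pv_equiv track=rewrite | github.com/spiritofrider/leetcode | array_2darray_conditions.py | array_2darray_conditions
-- ===== SOURCE A (Python) =====
-- import collections
--
-- def array_2darray_conditions(nums: list[int]) -> list:
--     store = collections.Counter(nums)
--     number_rows = max(store.values())
--     result = [[] for _ in range(number_rows)]
--
--     for num,count in store.items():
--         for i in range(count):
--             result[i].append(num)
--     return result
-- ===== SOURCE B (Python) =====
-- def _drop_last_occurrences(xs: list[int]) -> list[int]:
--     # remove the last occurrence of every distinct value: scan from the right,
--     # keeping a value only once it has already been seen
--     seen = set()
--     kept = []
--     for x in reversed(xs):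
--         if x in seen:
--             kept.append(x)
--         else:
--             seen.add(x)
--     kept.reverse()
--     return kept
--
-- def array_2darray_conditions(nums: list[int]) -> list:
--     # peel off one row at a time: the row is the distinct values (first-appearance
--     # order) of what remains; then drop one occurrence of each value and repeat
--     result = []
--     rest = nums
--     while rest:
--         result.append(list(dict.fromkeys(rest)))
--         rest = _drop_last_occurrences(rest)
--     return result
-- ===== Notes on version B (the rewrite author's own statement) =====
-- stated objective: alternative
-- what changed: B replaces A's Counter+max+distribute pass by a peeling loop: each row is the ordered distinct values of the remaining list (dict.fromkeys), then one occurrence of every distinct value (its last, found by a right-to-left seen-set scan) is removed and the loop repeats; no counter and no row count are ever computed.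
import Mathlib
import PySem

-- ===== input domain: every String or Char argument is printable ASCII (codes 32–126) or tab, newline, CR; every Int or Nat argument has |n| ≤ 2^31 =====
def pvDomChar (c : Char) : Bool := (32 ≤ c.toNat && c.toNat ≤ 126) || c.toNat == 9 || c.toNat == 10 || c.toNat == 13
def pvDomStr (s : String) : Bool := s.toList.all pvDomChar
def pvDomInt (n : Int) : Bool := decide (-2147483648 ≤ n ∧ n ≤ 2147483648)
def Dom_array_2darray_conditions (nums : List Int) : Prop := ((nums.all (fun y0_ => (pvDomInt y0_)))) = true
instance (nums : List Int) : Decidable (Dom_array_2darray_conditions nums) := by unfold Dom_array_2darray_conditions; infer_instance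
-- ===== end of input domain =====

-- B replaces A's Counter+max+distribute pass by a peeling loop (objective: alternative):
-- each row is the ordered distinct values of what remains, then one occurrence of
-- each value (its last) is removed and the loop repeats; no counter, no row count.

-- ===== PORT A =====
-- store = Counter(nums); number_rows = max(store.values()); result = [[] for _ in range(number_rows)];
-- for num,count in store.items(): for i in range(count): result[i].append(num)
def array_2darray_conditions (nums : List Int) : List (List Int) :=
  let store := PySem.Dict.counter nums
  let numberRows : Int := (PySem.List.max? store.values (fun v => v)).getD 0
  let result : List (List Int) := (PySem.List.pyRange 0 numberRows 1).map (fun _ => [])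
  store.items.foldl
    (fun r p =>
      (PySem.List.pyRange 0 p.2 1).foldl
        (fun r i => PySem.List.pySetD r i (PySem.List.pyGetD r i [] ++ [p.1])) r)
    result

-- ===== PORT B =====
-- pvDropLast and the lemmas up to pvDropLastStep_length_lt are here (above the port)
-- only because the port's termination proof cites pvDropLastStep_length_lt by name.
-- proof-side normal form of _drop_last_occurrences: keep x iff it occurs again later
def pvDropLast : List Int → List Int
  | [] => []
  | x :: xs => (if x ∈ xs then [x] else []) ++ pvDropLast xs

lemma pvDropLast_length_le (l : List Int) : (pvDropLast l).length ≤ l.length := by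
  induction l with
  | nil => simp [pvDropLast]
  | cons x xs ih =>
    simp only [pvDropLast, List.length_append, List.length_cons]
    split_ifs <;> simp <;> omega

lemma pvDropLast_length_lt (l : List Int) (h : l ≠ []) :
    (pvDropLast l).length < l.length := by
  cases l with
  | nil => exact absurd rfl h
  | cons x xs =>
    have := pvDropLast_length_le xs
    simp only [pvDropLast, List.length_append, List.length_cons]
    split_ifs with hx
    · have hxs : xs ≠ [] := by intro he; rw [he] at hx; exact absurd hx (List.not_mem_nil)
      have := pvDropLast_length_lt xs hxs
      simp; omega
    · simp; omega

-- the kept-part of the right-to-left scan, in scan order (head is processed last)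
def pvG : List Int → PySem.Set Int → List Int
  | [], _ => []
  | y :: ys, s => pvG ys s ++ (if y ∈ ys ∨ y ∈ s then [y] else [])

-- _drop_last_occurrences: seen = set(); kept = []; for x in reversed(xs):
--   if x in seen: kept.append(x) else: seen.add(x); kept.reverse()
def pvDropLastStep (xs : List Int) : List Int :=
  ((xs.reverse.foldl
      (fun (p : PySem.Set Int × List Int) x =>
        if PySem.Set.contains p.1 x then (p.1, p.2 ++ [x]) else (PySem.Set.add p.1 x, p.2))
      (PySem.Set.empty, [])).2).reverse

lemma pv_scan_spec : ∀ (xs : List Int) (seen : PySem.Set Int) (kept : List Int),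
    xs.reverse.foldl
        (fun (p : PySem.Set Int × List Int) x =>
          if PySem.Set.contains p.1 x then (p.1, p.2 ++ [x]) else (PySem.Set.add p.1 x, p.2))
        (seen, kept)
      = (PySem.Set.update seen xs.reverse, kept ++ pvG xs seen) := by
  intro xs
  induction xs with
  | nil => intro seen kept; simp [pvG, PySem.Set.update_nil]
  | cons y ys ih =>
    intro seen kept
    rw [List.reverse_cons, List.foldl_append, ih]
    simp only [List.foldl_cons, List.foldl_nil, pvG]
    rw [PySem.Set.update_append, PySem.Set.update_cons, PySem.Set.update_nil]
    by_cases hy : y ∈ ys ∨ y ∈ seen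
    · have hmem : y ∈ PySem.Set.update seen ys.reverse := by
        rcases hy with h | h
        · exact (PySem.Set.mem_update _ _ _).mpr (Or.inr (List.mem_reverse.mpr h))
        · exact (PySem.Set.mem_update _ _ _).mpr (Or.inl h)
      have hc : PySem.Set.contains (PySem.Set.update seen ys.reverse) y = true :=
        (PySem.Set.contains_iff _ _).mpr hmem
      simp [hc, hy, PySem.Set.add_of_mem hmem, List.append_assoc]
      tauto
    · have hmem : y ∉ PySem.Set.update seen ys.reverse := by
        intro h
        rcases (PySem.Set.mem_update _ _ _).mp h with h | h
        · exact hy (Or.inr h)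
        · exact hy (Or.inl (List.mem_reverse.mp h))
      have hc : ¬ (PySem.Set.contains (PySem.Set.update seen ys.reverse) y = true) :=
        fun h => hmem ((PySem.Set.contains_iff _ _).mp h)
      simp [hc, hy]
      tauto

lemma pv_step_eq_dropLast (xs : List Int) : pvDropLastStep xs = pvDropLast xs := by
  have h : ∀ l : List Int, (pvG l ([] : PySem.Set Int)).reverse = pvDropLast l := by
    intro l
    induction l with
    | nil => simp [pvG, pvDropLast]
    | cons y ys ih =>
      simp only [pvG, pvDropLast, List.reverse_append]
      by_cases hy : y ∈ ys
      · simp [hy, ih]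
      · simp [hy, ih]
  unfold pvDropLastStep
  rw [pv_scan_spec]
  simpa using h xs

lemma pvDropLastStep_length_lt (l : List Int) (h : l ≠ []) :
    (pvDropLastStep l).length < l.length := by
  rw [pv_step_eq_dropLast]
  exact pvDropLast_length_lt l h

-- result = []; rest = nums; while rest: result.append(list(dict.fromkeys(rest)));
--   rest = _drop_last_occurrences(rest); return result
def array_2darray_conditions_alt (nums : List Int) : List (List Int) :=
  if h : nums = [] then []
  else PySem.List.dedup nums :: array_2darray_conditions_alt (pvDropLastStep nums)
termination_by nums.length
decreasing_by exact pvDropLastStep_length_lt nums h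

-- ===== PRECONDITION & SPEC =====
-- Pre_ excludes only the empty list, on which Python's max(store.values()) raises ValueError in A.
def Pre_array_2darray_conditions (nums : List Int) : Prop := nums ≠ []
instance (nums : List Int) : Decidable (Pre_array_2darray_conditions nums) := by unfold Pre_array_2darray_conditions; infer_instance
def pvWitness_array_2darray_conditions : List Int := [1, 2, 2]

def Spec_array_2darray_conditions (nums : List Int) (out : List (List Int)) : Prop := out = array_2darray_conditions_alt nums
instance (nums : List Int) (out : List (List Int)) : Decidable (Spec_array_2darray_conditions nums out) := by unfold Spec_array_2darray_conditions; infer_instance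

-- ===== CLAIM (what is proved, stated in full; the proofs are below) =====
def Claim_equal_array_2darray_conditions : Prop := ∀ (nums : List Int), Dom_array_2darray_conditions nums → Pre_array_2darray_conditions nums → Spec_array_2darray_conditions nums (array_2darray_conditions nums)
-- ===== LEMMAS AND PROOFS =====

-- the common normal form both ports are reduced to: row i = distinct values with count > i
def pvRowN (l : List Int) (i : Nat) : List Int :=
  (PySem.Set.ofList l).filter (fun k => decide (i < l.count k))

def pvMt (l : List Int) : Nat :=
  ((PySem.List.max? (PySem.Dict.counter l).values (fun v => v)).getD 0).toNat

def pvRows (nums : List Int) : List (List Int) :=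
  (PySem.List.pyRange 0 ((PySem.List.max? (PySem.Dict.counter nums).values (fun v => v)).getD 0) 1).map
    (fun i => ((PySem.Dict.counter nums).items.filter (fun p => p.2 > i)).map Prod.fst)

-- ---- A-side: A's distribute loop equals pvRows ----

-- closed form of A's inner loop (append x to the first m rows), Nat-index form
lemma pv_inner_closed (x : Int) :
    ∀ (m : Nat) (r : List (List Int)), m ≤ r.length →
      (List.range m).foldl (fun r k => r.set k (r.getD k [] ++ [x])) r
        = (r.take m).map (· ++ [x]) ++ r.drop m := by
  intro m
  induction m with
  | zero => intro r _; simp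
  | succ m ih =>
    intro r hm
    rw [List.range_succ, List.foldl_append, ih r (by omega)]
    simp only [List.foldl_cons, List.foldl_nil]
    have hlen : ((r.take m).map (· ++ [x])).length = m := by
      simp [List.length_take]; omega
    have hdrop : r.drop m = r[m] :: r.drop (m + 1) := List.drop_eq_getElem_cons (by omega)
    rw [hdrop, List.getD_eq_getElem?_getD, List.getElem?_append_right (by omega), hlen]
    simp only [Nat.sub_self, List.getElem?_cons_zero, Option.getD_some]
    rw [List.set_append_right _ _ (by omega), hlen]
    simp only [Nat.sub_self, List.set_cons_zero]
    have htail : List.take (m + 1) (List.map (· ++ [x]) r)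
        = List.take m (List.map (· ++ [x]) r) ++ [r[m] ++ [x]] := by
      rw [List.take_add_one, List.getElem?_map, List.getElem?_eq_getElem (by omega)]
      simp; rfl
    simp [htail]

-- A's inner loop over pyRange 0 c 1 equals the Nat-form loop
lemma pv_inner_range (x : Int) (c : Int) (r : List (List Int)) :
    (PySem.List.pyRange 0 c 1).foldl
        (fun r i => PySem.List.pySetD r i (PySem.List.pyGetD r i [] ++ [x])) r
      = (List.range c.toNat).foldl (fun r k => r.set k (r.getD k [] ++ [x])) r := by
  rw [PySem.List.pyRange_one, List.foldl_map]
  simp only [Int.sub_zero, Int.zero_add]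
  refine PySem.List.foldl_congr_mem _ _ _ _ (fun r' k _ => ?_)
  simp [PySem.List.pySetD_natCast, PySem.List.pyGetD_natCast]

-- outer loop invariant: folding A's distribution step over any item list with counts ≤ row count
lemma pv_outer (ps : List (Int × Int)) :
    ∀ (r : List (List Int)),
      (∀ p ∈ ps, p.2 ≤ (r.length : Int)) →
      ps.foldl
        (fun r p =>
          (PySem.List.pyRange 0 p.2 1).foldl
            (fun r i => PySem.List.pySetD r i (PySem.List.pyGetD r i [] ++ [p.1])) r) r
        = (List.range r.length).map
            (fun j => r.getD j [] ++ ((ps.filter (fun p => p.2 > (j : Int))).map Prod.fst)) := by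
  induction ps with
  | nil =>
    intro r _
    simp only [List.foldl_nil, List.filter_nil, List.map_nil, List.append_nil]
    apply List.ext_getElem? ; intro j
    rcases Nat.lt_or_ge j r.length with hj | hj
    · simp [List.getElem?_map, List.getElem?_range hj, List.getD_eq_getElem?_getD,
        List.getElem?_eq_getElem hj]
    · rw [List.getElem?_eq_none_iff.mpr (by simpa using hj),
        List.getElem?_eq_none_iff.mpr (by simpa using hj)]
  | cons q ps ih =>
    intro r hc
    rcases q with ⟨x, c⟩
    simp only [List.foldl_cons]
    rw [pv_inner_range]
    have hcle : c ≤ (r.length : Int) := hc (x, c) (List.mem_cons_self)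
    have hct : c.toNat ≤ r.length := by omega
    rw [pv_inner_closed x c.toNat r hct]
    set r' := (r.take c.toNat).map (· ++ [x]) ++ r.drop c.toNat with hr'
    have hlen' : r'.length = r.length := by
      simp [hr', List.length_take]; omega
    have hget : ∀ j : Nat, j < r.length →
        r'.getD j [] = if (j : Int) < c then r.getD j [] ++ [x] else r.getD j [] := by
      intro j hj
      rcases Nat.lt_or_ge j c.toNat with hjc | hjc
      · have h2 : (j : Int) < c := by omega
        rw [if_pos h2, hr']
        rw [List.getD_eq_getElem?_getD, List.getElem?_append_left (by simp [List.length_take]; omega)]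
        simp [List.getElem?_map, hjc, List.getElem?_eq_getElem hj, List.getD_eq_getElem?_getD]
      · have hnot : ¬ ((j : Int) < c) := by omega
        rw [if_neg hnot, hr']
        rw [List.getD_eq_getElem?_getD, List.getElem?_append_right (by simp [List.length_take]; omega)]
        have hlt : List.length (List.map (· ++ [x]) (List.take c.toNat r)) = c.toNat := by
          simp [List.length_take]; omega
        rw [hlt, List.getElem?_drop, Nat.add_sub_cancel' hjc]
        simp [List.getD_eq_getElem?_getD]
    have hc' : ∀ p ∈ ps, p.2 ≤ (r'.length : Int) := by
      intro p hp; rw [hlen']; exact hc p (List.mem_cons_of_mem _ hp)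
    rw [ih r' hc', hlen']
    refine List.map_congr_left (fun j hj => ?_)
    have hjlt : j < r.length := List.mem_range.mp hj
    rw [hget j hjlt]
    simp only [List.filter_cons]
    by_cases hjc : c > (j : Int)
    · simp [hjc]
    · simp [hjc]

lemma pv_combined (items : List (Int × Int)) (nI : Int)
    (hcnt : ∀ p ∈ items, 1 ≤ p.2 ∧ p.2 ≤ nI) :
    items.foldl
        (fun r p =>
          (PySem.List.pyRange 0 p.2 1).foldl
            (fun r i => PySem.List.pySetD r i (PySem.List.pyGetD r i [] ++ [p.1])) r)
        ((PySem.List.pyRange 0 nI 1).map (fun _ => ([] : List Int)))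
      = (PySem.List.pyRange 0 nI 1).map
          (fun i => (items.filter (fun p => p.2 > i)).map Prod.fst) := by
  have hinit : (PySem.List.pyRange 0 nI 1).map (fun _ => ([] : List Int))
      = List.replicate nI.toNat ([] : List Int) := by
    apply List.eq_replicate_iff.mpr
    constructor
    · simp [PySem.List.length_pyRange_one]
    · intro b hb
      obtain ⟨a, ha, hab⟩ := List.mem_map.mp hb
      exact hab.symm
  rw [hinit]
  have hcle : ∀ p ∈ items, p.2 ≤ ((List.replicate nI.toNat ([] : List Int)).length : Int) := by
    intro p hp
    have := hcnt p hp
    simp only [List.length_replicate]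
    omega
  rw [pv_outer items _ hcle]
  simp only [List.length_replicate]
  rw [PySem.List.pyRange_one, List.map_map]
  simp only [Int.sub_zero, Int.zero_add]
  refine List.map_congr_left (fun j hj => ?_)
  have hjlt : j < nI.toNat := List.mem_range.mp hj
  rw [List.getD_eq_getElem?_getD, List.getElem?_replicate]
  simp only [hjlt, if_pos, Option.getD_some, List.nil_append]
  rfl

theorem pv_a_rows (nums : List Int) (hne : nums ≠ []) :
    array_2darray_conditions nums = pvRows nums := by
  have hvne : (PySem.Dict.counter nums).values ≠ [] := by
    obtain ⟨y, ys, hys⟩ := List.exists_cons_of_ne_nil hne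
    have hy : y ∈ PySem.Set.ofList nums :=
      (PySem.Set.mem_ofList _ _).mpr (by rw [hys]; exact List.mem_cons_self)
    intro h
    have hitems : (PySem.Dict.counter nums).items = [] := by
      have h' : (PySem.Dict.counter nums).items.map Prod.snd = [] := by
        simpa [PySem.Dict.values] using h
      exact List.map_eq_nil_iff.mp h'
    rw [PySem.Dict.items_counter] at hitems
    have h2 := List.map_eq_nil_iff.mp hitems
    simp [h2] at hy
  have hcnt : ∀ p ∈ (PySem.Dict.counter nums).items,
      1 ≤ p.2 ∧ p.2 ≤ (PySem.List.max? (PySem.Dict.counter nums).values (fun v => v)).getD 0 := by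
    intro p hp
    constructor
    · have hp' : p ∈ (PySem.Set.ofList nums).map (fun k => (k, (nums.count k : Int))) := by
        rw [← PySem.Dict.items_counter]; exact hp
      obtain ⟨k, hk, hpk⟩ := List.mem_map.mp hp'
      have hcp : 0 < nums.count k := List.count_pos_iff.mpr ((PySem.Set.mem_ofList _ _).mp hk)
      have h2 : p.2 = (nums.count k : Int) := by rw [← hpk]
      omega
    · have hv : p.2 ∈ (PySem.Dict.counter nums).values := by
        have := List.mem_map_of_mem (f := Prod.snd) hp
        simpa [PySem.Dict.values] using this
      cases h : PySem.List.max? (PySem.Dict.counter nums).values (fun w => w) with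
      | none => exact absurd ((PySem.List.max?_eq_none_iff _ _).mp h) hvne
      | some m =>
        have := PySem.List.max?_isMax h p.2 hv
        simpa [h] using this
  exact pv_combined (PySem.Dict.counter nums).items
    ((PySem.List.max? (PySem.Dict.counter nums).values (fun v => v)).getD 0) hcnt

-- pvRows in Nat-indexed normal form
lemma pv_rows_eq (l : List Int) :
    pvRows l = (List.range (pvMt l)).map (pvRowN l) := by
  unfold pvRows pvMt
  rw [PySem.Dict.items_counter, PySem.List.pyRange_one, List.map_map]
  simp only [Int.sub_zero, Int.zero_add]
  refine List.map_congr_left (fun j _ => ?_)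
  simp only [Function.comp]
  unfold pvRowN
  rw [List.filter_map, List.map_map]
  have hpt : ∀ k ∈ PySem.Set.ofList l,
      ((fun p : Int × Int => decide (p.2 > ((j : Nat) : Int))) ∘ (fun k => (k, (l.count k : Int)))) k
        = decide (j < l.count k) := by
    intro k _
    simp only [Function.comp, gt_iff_lt, Nat.cast_lt]
  rw [List.filter_congr hpt]
  exact (List.map_congr_left (fun k _ => rfl)).trans (List.map_id _)

-- ---- B-side counting facts ----

lemma pv_count_dropLast (l : List Int) (y : Int) :
    (pvDropLast l).count y = l.count y - 1 := by
  induction l with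
  | nil => simp [pvDropLast]
  | cons x xs ih =>
    by_cases hx : x ∈ xs
    · have hc : 0 < xs.count x := List.count_pos_iff.mpr hx
      by_cases hxy : x = y
      · subst hxy
        simp [pvDropLast, hx, ih]
      · simp [pvDropLast, hx, ih, hxy]
    · have hc : xs.count x = 0 := List.count_eq_zero.mpr hx
      by_cases hxy : x = y
      · subst hxy
        simp [pvDropLast, hx, ih, hc]
      · simp [pvDropLast, hx, ih, hxy]

lemma pv_mem_dropLast (l : List Int) (y : Int) :
    y ∈ pvDropLast l ↔ 2 ≤ l.count y := by
  rw [← List.count_pos_iff, pv_count_dropLast]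
  omega

lemma pv_ofList_dropLast (l : List Int) :
    PySem.Set.ofList (pvDropLast l)
      = (PySem.Set.ofList l).filter (fun k => decide (2 ≤ l.count k)) := by
  induction l with
  | nil => simp [pvDropLast, PySem.Set.ofList_nil]
  | cons x xs ih =>
    by_cases hx : x ∈ xs
    · have hstep : pvDropLast (x :: xs) = x :: pvDropLast xs := by
        simp [pvDropLast, hx]
      rw [hstep, PySem.Set.ofList_cons, PySem.Set.ofList_cons, ih]
      have hcx : 2 ≤ (x :: xs).count x := by
        have : 0 < xs.count x := List.count_pos_iff.mpr hx
        simp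
        omega
      simp only [List.filter_cons, hcx, decide_true, if_pos]
      congr 1
      simp only [PySem.Set.discard, List.filter_filter]
      refine List.filter_congr (fun k _ => ?_)
      by_cases hkx : k = x
      · subst hkx; simp
      · have hxk : ¬ x = k := fun h => hkx h.symm
        simp [hxk, Bool.and_comm]
    · have hstep : pvDropLast (x :: xs) = pvDropLast xs := by
        simp [pvDropLast, hx]
      rw [hstep, ih, PySem.Set.ofList_cons]
      have hcx : ¬ (2 ≤ (x :: xs).count x) := by
        have : xs.count x = 0 := List.count_eq_zero.mpr hx
        simp
        omega
      simp only [List.filter_cons, hcx, decide_false, if_neg, Bool.false_eq_true,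
        not_false_eq_true]
      have hnd : (PySem.Set.ofList xs).discard x = PySem.Set.ofList xs := by
        simp only [PySem.Set.discard]
        refine List.filter_eq_self.mpr (fun a ha => ?_)
        have : a ≠ x := by
          intro he; subst he
          exact hx ((PySem.Set.mem_ofList _ _).mp ha)
        simp [this]
      rw [hnd]
      refine List.filter_congr (fun k hk => ?_)
      have hkx : k ≠ x := by
        intro he; subst he
        exact hx ((PySem.Set.mem_ofList _ _).mp hk)
      have hxk : ¬ x = k := fun h => hkx h.symm
      simp [hxk]

-- ---- the maximal count pvMt ----

lemma pv_count_le_Mt (l : List Int) (y : Int) (hy : y ∈ l) : l.count y ≤ pvMt l := by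
  unfold pvMt
  have hv : ((l.count y : Nat) : Int) ∈ (PySem.Dict.counter l).values := by
    have : (PySem.Dict.counter l).values
        = (PySem.Set.ofList l).map (fun k => (l.count k : Int)) := by
      simp [PySem.Dict.values, PySem.Dict.items_counter, List.map_map]
    rw [this]
    exact List.mem_map_of_mem ((PySem.Set.mem_ofList _ _).mpr hy)
  cases h : PySem.List.max? (PySem.Dict.counter l).values (fun w => w) with
  | none =>
    have := (PySem.List.max?_eq_none_iff _ _).mp h
    rw [this] at hv; simp at hv
  | some m =>
    have := PySem.List.max?_isMax h _ hv
    simp only [Option.getD_some]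
    omega

lemma pv_Mt_achieved (l : List Int) (hne : l ≠ []) :
    ∃ y ∈ l, l.count y = pvMt l := by
  unfold pvMt
  have hvals : (PySem.Dict.counter l).values
      = (PySem.Set.ofList l).map (fun k => (l.count k : Int)) := by
    simp [PySem.Dict.values, PySem.Dict.items_counter, List.map_map]
  cases h : PySem.List.max? (PySem.Dict.counter l).values (fun w => w) with
  | none =>
    have h0 := (PySem.List.max?_eq_none_iff _ _).mp h
    rw [hvals] at h0
    have := List.map_eq_nil_iff.mp h0
    obtain ⟨y, ys, hys⟩ := List.exists_cons_of_ne_nil hne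
    have : y ∈ PySem.Set.ofList l :=
      (PySem.Set.mem_ofList _ _).mpr (by rw [hys]; exact List.mem_cons_self)
    simp_all
  | some m =>
    have hm := PySem.List.max?_mem h
    rw [hvals] at hm
    obtain ⟨k, hk, hkm⟩ := List.mem_map.mp hm
    refine ⟨k, (PySem.Set.mem_ofList _ _).mp hk, ?_⟩
    simp only [Option.getD_some]
    omega

lemma pv_Mt_pos (l : List Int) (hne : l ≠ []) : 1 ≤ pvMt l := by
  obtain ⟨y, ys, hys⟩ := List.exists_cons_of_ne_nil hne
  have hy : y ∈ l := by rw [hys]; exact List.mem_cons_self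
  have h1 : 0 < l.count y := List.count_pos_iff.mpr hy
  have := pv_count_le_Mt l y hy
  omega

lemma pv_Mt_dropLast (l : List Int) (hne : l ≠ []) :
    pvMt (pvDropLast l) = pvMt l - 1 := by
  obtain ⟨k0, hk0, hc0⟩ := pv_Mt_achieved l hne
  have hpos := pv_Mt_pos l hne
  by_cases h2 : 2 ≤ pvMt l
  · have hk0' : k0 ∈ pvDropLast l := (pv_mem_dropLast l k0).mpr (by omega)
    have hdne : pvDropLast l ≠ [] := by
      intro he; rw [he] at hk0'; exact absurd hk0' (List.not_mem_nil)
    obtain ⟨y1, hy1, hc1⟩ := pv_Mt_achieved (pvDropLast l) hdne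
    have hy1l : y1 ∈ l := by
      have := (pv_mem_dropLast l y1).mp hy1
      exact List.count_pos_iff.mp (by omega)
    have hub : l.count y1 ≤ pvMt l := pv_count_le_Mt l y1 hy1l
    have hlb : (pvDropLast l).count k0 ≤ pvMt (pvDropLast l) :=
      pv_count_le_Mt _ k0 hk0'
    rw [pv_count_dropLast] at hc1 hlb
    omega
  · have hall : pvDropLast l = [] := by
      refine List.eq_nil_iff_forall_not_mem.mpr (fun y hy => ?_)
      have h2y := (pv_mem_dropLast l y).mp hy
      have hyl : y ∈ l := List.count_pos_iff.mp (by omega)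
      have := pv_count_le_Mt l y hyl
      omega
    rw [hall]
    have : pvMt ([] : List Int) = 0 := by decide
    omega

-- ---- B equals pvRows ----

lemma pv_row_zero (l : List Int) : pvRowN l 0 = PySem.List.dedup l := by
  unfold pvRowN
  rw [PySem.List.dedup_eq_ofList]
  refine List.filter_eq_self.mpr (fun k hk => ?_)
  have : k ∈ l := (PySem.Set.mem_ofList _ _).mp hk
  simp [List.count_pos_iff.mpr this]

lemma pv_row_succ (l : List Int) (i : Nat) :
    pvRowN l (i + 1) = pvRowN (pvDropLast l) i := by
  unfold pvRowN
  rw [pv_ofList_dropLast]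
  simp only [List.filter_filter, pv_count_dropLast]
  refine List.filter_congr (fun k _ => ?_)
  by_cases h2 : 2 ≤ l.count k
  · by_cases h3 : i < l.count k - 1
    · have h4 : i + 1 < l.count k := by omega
      simp [h2, h3, h4]
    · have h4 : ¬ i + 1 < l.count k := by omega
      simp [h3, h4]
  · have h3 : ¬ i < l.count k - 1 := by omega
    have h4 : ¬ i + 1 < l.count k := by omega
    simp [h2, h3, h4]

lemma pv_alt_eq_rows : ∀ (n : Nat) (l : List Int), l.length ≤ n →
    array_2darray_conditions_alt l = (List.range (pvMt l)).map (pvRowN l) := by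
  intro n
  induction n with
  | zero =>
    intro l hl
    have hnil : l = [] := List.length_eq_zero_iff.mp (by omega)
    subst hnil
    rw [array_2darray_conditions_alt]
    have h0 : pvMt ([] : List Int) = 0 := by decide
    simp [h0]
  | succ n ih =>
    intro l hl
    by_cases hne : l = []
    · subst hne
      rw [array_2darray_conditions_alt]
      have h0 : pvMt ([] : List Int) = 0 := by decide
      simp [h0]
    · rw [array_2darray_conditions_alt, dif_neg hne]
      rw [pv_step_eq_dropLast]
      have hrec : array_2darray_conditions_alt (pvDropLast l)
          = (List.range (pvMt (pvDropLast l))).map (pvRowN (pvDropLast l)) := by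
        refine ih _ ?_
        have := pvDropLast_length_lt l hne
        omega
      rw [hrec, pv_Mt_dropLast l hne]
      have hpos := pv_Mt_pos l hne
      have hM : pvMt l = (pvMt l - 1) + 1 := by omega
      conv_rhs => rw [hM, List.range_succ_eq_map]
      rw [List.map_cons, List.map_map]
      congr 1
      · exact (pv_row_zero l).symm
      · refine (List.map_congr_left (fun i _ => ?_)).symm
        simp only [Function.comp]
        exact pv_row_succ l i

lemma pv_b_rows (nums : List Int) :
    array_2darray_conditions_alt nums = pvRows nums := by
  rw [pv_rows_eq]
  exact pv_alt_eq_rows nums.length nums (le_refl _)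

-- ===== VERDICT (by name: the statements are the Claim_ definitions above) =====
theorem array_2darray_conditions_spec : Claim_equal_array_2darray_conditions := by
  intro nums _ hpre
  unfold Spec_array_2darray_conditions
  rw [pv_a_rows nums hpre, pv_b_rows]
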